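-- pv_equiv track=rewrite | github.com/Fsoft-AIC/BO-uCVS | core/regret.py | first_index_of_conv
-- ===== SOURCE A (Python) =====
-- def first_index_of_conv(control_set_idxs, best_idx):
--     v = len(control_set_idxs)
--     first_index = v - 1
--     for j in range(1, v + 1):
--         if control_set_idxs[v - j] == best_idx:
--             first_index = v - j
--         else:
--             break
--     return first_index
-- ===== SOURCE B (Python) =====
-- def first_index_of_conv(control_set_idxs, best_idx):
--     v = len(control_set_idxs)
--     last_mismatch = -1
--     for i, x in enumerate(control_set_idxs):
--         if x != best_idx:
--             last_mismatch = i
--     if last_mismatch == v - 1: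
--         return v - 1
--     return last_mismatch + 1
-- ===== Notes on version B (the rewrite author's own statement) =====
-- stated objective: alternative
-- what changed: Replaced the backward suffix walk with early break by a single forward scan that records the index of the last mismatching element, followed by a branch (return v-1 if the last element mismatches or the list is empty, else last_mismatch+1).
import Mathlib
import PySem

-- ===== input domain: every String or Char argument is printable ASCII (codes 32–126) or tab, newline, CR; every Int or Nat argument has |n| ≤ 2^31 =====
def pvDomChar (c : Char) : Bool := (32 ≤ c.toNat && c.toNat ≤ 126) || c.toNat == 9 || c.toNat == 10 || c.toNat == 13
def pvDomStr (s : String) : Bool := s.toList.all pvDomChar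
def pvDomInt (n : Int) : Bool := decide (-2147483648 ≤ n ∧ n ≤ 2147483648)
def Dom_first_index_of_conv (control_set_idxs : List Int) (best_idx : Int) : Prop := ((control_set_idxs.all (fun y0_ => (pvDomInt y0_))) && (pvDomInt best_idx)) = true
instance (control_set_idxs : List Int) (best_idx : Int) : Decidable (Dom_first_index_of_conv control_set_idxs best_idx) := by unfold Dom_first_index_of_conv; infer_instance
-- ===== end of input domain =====

-- B replaces A's backward walk-with-break by a forward scan for the last mismatching
-- index followed by a branch (objective: alternative decomposition, same cost).

-- ===== PORT A =====
-- the for-loop with `break`: recursion over the remaining js of range(1, v+1)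
def first_index_of_conv_go (xs : List Int) (b : Int) (v : Int) : List Int → Int → Int
  | [], first => first
  | j :: rest, first =>
    match PySem.List.pyGet? xs (v - j) with
    | some x => if x = b then first_index_of_conv_go xs b v rest (v - j) else first
    | none => first   -- IndexError: unreachable since v = len(xs) and 1 ≤ j ≤ v

def first_index_of_conv (control_set_idxs : List Int) (best_idx : Int) : Int :=
  let v : Int := control_set_idxs.length
  first_index_of_conv_go control_set_idxs best_idx v (PySem.List.pyRange 1 (v + 1) 1) (v - 1)

-- ===== PORT B =====
def first_index_of_conv_alt (control_set_idxs : List Int) (best_idx : Int) : Int :=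
  let v : Int := control_set_idxs.length
  let last_mismatch : Int :=
    (PySem.List.enumerate control_set_idxs 0).foldl
      (fun m p => if p.2 ≠ best_idx then p.1 else m) (-1)
  if last_mismatch = v - 1 then v - 1 else last_mismatch + 1

-- ===== PRECONDITION & SPEC =====
def Spec_first_index_of_conv (control_set_idxs : List Int) (best_idx : Int) (out : Int) : Prop := out = first_index_of_conv_alt control_set_idxs best_idx
instance (control_set_idxs : List Int) (best_idx : Int) (out : Int) : Decidable (Spec_first_index_of_conv control_set_idxs best_idx out) := by unfold Spec_first_index_of_conv; infer_instance

-- ===== CLAIM (what is proved, stated in full; the proofs are below) =====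
def Claim_equal_first_index_of_conv : Prop := ∀ (control_set_idxs : List Int) (best_idx : Int), Dom_first_index_of_conv control_set_idxs best_idx → Spec_first_index_of_conv control_set_idxs best_idx (first_index_of_conv control_set_idxs best_idx)

-- ===== LEMMAS AND PROOFS =====

-- length of the trailing run, read as a prefix run of the reversed list
def pvTrail (b : Int) : List Int → Nat
  | [] => 0
  | x :: r => if x = b then pvTrail b r + 1 else 0

theorem pvGo_shift (ys : List Int) (a b : Int) (js : List Int) (first : Int)
    (hjs : ∀ j ∈ js, 1 ≤ j ∧ j ≤ (ys.length : Int)) :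
    first_index_of_conv_go (ys ++ [a]) b ((ys.length : Int) + 1) (js.map (· + 1)) first
      = first_index_of_conv_go ys b (ys.length : Int) js first := by
  induction js generalizing first with
  | nil => simp [first_index_of_conv_go]
  | cons j rest ih =>
    obtain ⟨h1, h2⟩ := hjs j (List.mem_cons_self)
    have hidx : ((ys.length : Int) + 1) - (j + 1) = (ys.length : Int) - j := by omega
    have hnn : 0 ≤ (ys.length : Int) - j := by omega
    have hlt : ((ys.length : Int) - j).toNat < ys.length := by omega
    have hget : PySem.List.pyGet? (ys ++ [a]) ((ys.length : Int) - j)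
        = PySem.List.pyGet? ys ((ys.length : Int) - j) := by
      rw [PySem.List.pyGet?_of_nonneg _ hnn, PySem.List.pyGet?_of_nonneg _ hnn,
        List.getElem?_append_left hlt]
    simp only [List.map_cons, first_index_of_conv_go, hidx, hget]
    cases hg : PySem.List.pyGet? ys ((ys.length : Int) - j) with
    | none => rfl
    | some x =>
      by_cases hx : x = b
      · simp only [hx, if_true]
        exact ih _ (fun j hj => hjs j (List.mem_cons_of_mem _ hj))
      · simp [hx]

theorem pvRange_shift (n : Nat) :
    PySem.List.pyRange 2 ((n : Int) + 2) 1 = (PySem.List.pyRange 1 ((n : Int) + 1) 1).map (· + 1) := by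
  rw [PySem.List.pyRange_one, PySem.List.pyRange_one]
  have h2 : (((n : Int) + 2) - 2).toNat = n := by omega
  have h1 : (((n : Int) + 1) - 1).toNat = n := by omega
  rw [h1, h2, List.map_map]
  exact List.map_congr_left fun k _ => by simp; omega

theorem pvGoA (xs : List Int) (b : Int) (first : Int) :
    first_index_of_conv_go xs b (xs.length : Int) (PySem.List.pyRange 1 ((xs.length : Int) + 1) 1) first
      = if pvTrail b xs.reverse = 0 then first else (xs.length : Int) - pvTrail b xs.reverse := by
  induction xs using List.reverseRecOn generalizing first with
  | nil =>
    simp only [List.length_nil, Nat.cast_zero, zero_add]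
    rw [PySem.List.pyRange_one_eq_nil (le_refl 1)]
    simp [first_index_of_conv_go, pvTrail]
  | append_singleton ys a ih =>
    have hn : ((ys ++ [a]).length : Int) = (ys.length : Int) + 1 := by simp
    rw [hn]
    have hcons : PySem.List.pyRange 1 ((ys.length : Int) + 1 + 1) 1
        = 1 :: PySem.List.pyRange 2 ((ys.length : Int) + 1 + 1) 1 := by
      rw [PySem.List.pyRange_one_cons (by omega)]; norm_num
    rw [hcons]
    have hgeta : PySem.List.pyGet? (ys ++ [a]) ((ys.length : Int) + 1 - 1) = some a := by
      have h : ((ys.length : Int) + 1 - 1) = ((ys.length : Int)) := by omega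
      rw [h]
      exact PySem.List.pyGet?_append_length ys [] a
    simp only [first_index_of_conv_go, hgeta]
    have htr : pvTrail b (ys ++ [a]).reverse = if a = b then pvTrail b ys.reverse + 1 else 0 := by
      simp [pvTrail]
    rw [htr]
    by_cases hab : a = b
    · simp only [if_pos hab]
      have h1 : ((ys.length : Int) + 1 - 1) = ((ys.length : Int)) := by omega
      have h2 : ((ys.length : Int) + 1 + 1) = ((ys.length : Int) + 2) := by omega
      rw [h1, h2, pvRange_shift, pvGo_shift ys a b _ _
        (fun j hj => by have := (PySem.List.mem_pyRange_one).1 hj; omega), ih]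
      rw [if_neg (Nat.succ_ne_zero _)]
      split_ifs with ht
      · rw [ht]; push_cast; omega
      · push_cast; omega
    · simp [hab]

theorem pvB_foldl (xs : List Int) (b : Int) :
    (PySem.List.enumerate xs 0).foldl (fun m p => if p.2 ≠ b then p.1 else m) (-1)
      = (xs.length : Int) - pvTrail b xs.reverse - 1 := by
  induction xs using List.reverseRecOn with
  | nil => simp [PySem.List.enumerate, pvTrail]
  | append_singleton ys a ih =>
    rw [PySem.List.enumerate_append, List.foldl_append, ih]
    have he : PySem.List.enumerate [a] (0 + (ys.length : Int)) = [((ys.length : Int), a)] := by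
      simp [PySem.List.enumerate]
    rw [he, List.foldl_cons, List.foldl_nil]
    have htr : pvTrail b (ys ++ [a]).reverse = if a = b then pvTrail b ys.reverse + 1 else 0 := by
      simp [pvTrail]
    rw [htr, List.length_append]
    by_cases hab : a = b
    · rw [if_pos hab]
      simp only [hab, ne_eq, not_true_eq_false, if_false]
      push_cast [List.length_singleton]; omega
    · rw [if_neg hab]
      simp only [ne_eq, hab, not_false_eq_true, if_true]
      push_cast [List.length_singleton]; omega

-- ===== VERDICT (by name: the statement is the Claim_ definition above) =====
theorem first_index_of_conv_spec : Claim_equal_first_index_of_conv := by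
  intro xs b _
  unfold Spec_first_index_of_conv first_index_of_conv first_index_of_conv_alt
  simp only
  rw [pvGoA, pvB_foldl]
  by_cases h0 : pvTrail b xs.reverse = 0
  · have h : (xs.length : Int) - (pvTrail b xs.reverse : Int) - 1 = (xs.length : Int) - 1 := by
      rw [h0]; push_cast; omega
    rw [h, if_pos h0, if_pos rfl]
  · have hne : (xs.length : Int) - (pvTrail b xs.reverse : Int) - 1 ≠ (xs.length : Int) - 1 := by
      omega
    rw [if_neg h0, if_neg hne]
    omega
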